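-- pv_equiv track=rewrite | github.com/nixxholas/IS111-rekt | Seminar12/LYL/Trial2/Q5/Trial LT2 Extra Question Solution.py | get_num_common_words
-- ===== SOURCE A (Python) =====
-- def get_num_common_words(doc1, doc2):
--
--     # each doc is a tuple of (doc_id, word_list)
--     word_list1 = doc1[1]
--     word_list2 = doc2[1]
--
--     common_word_list = []
--     for word in word_list1:
--         if word not in common_word_list and word in word_list2:
--             common_word_list.append(word)
--     return len(common_word_list)
-- ===== SOURCE B (Python) =====
-- def get_num_common_words(doc1, doc2):
--     # each doc is a tuple of (doc_id, word_list)
--     s1 = sorted(doc1[1])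
--     s2 = sorted(doc2[1])
--     i = j = count = 0
--     while i < len(s1) and j < len(s2):
--         if s1[i] < s2[j]:
--             i += 1
--         elif s2[j] < s1[i]:
--             j += 1
--         else:
--             w = s1[i]
--             count += 1
--             while i < len(s1) and s1[i] == w:
--                 i += 1
--             while j < len(s2) and s2[j] == w:
--                 j += 1
--     return count
-- ===== Notes on version B (the rewrite author's own statement) =====
-- stated objective: faster
-- what changed: Replaces A's loop with membership scans over word_list2 and a growing dedup list by sorting both word lists and counting common distinct words with a two-pointer merge that skips duplicate runs.
import Mathlib
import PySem

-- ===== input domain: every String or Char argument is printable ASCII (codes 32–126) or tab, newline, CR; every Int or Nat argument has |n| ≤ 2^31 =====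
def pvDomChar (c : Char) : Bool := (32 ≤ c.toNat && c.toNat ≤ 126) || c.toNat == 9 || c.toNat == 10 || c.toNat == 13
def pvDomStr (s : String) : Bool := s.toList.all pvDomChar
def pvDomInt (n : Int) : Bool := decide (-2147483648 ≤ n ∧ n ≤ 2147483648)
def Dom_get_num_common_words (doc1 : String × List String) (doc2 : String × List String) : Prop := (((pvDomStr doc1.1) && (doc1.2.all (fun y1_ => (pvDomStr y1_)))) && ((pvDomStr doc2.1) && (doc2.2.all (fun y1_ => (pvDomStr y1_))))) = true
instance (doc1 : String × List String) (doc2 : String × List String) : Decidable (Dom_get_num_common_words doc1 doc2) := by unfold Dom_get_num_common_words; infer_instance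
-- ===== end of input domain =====

-- B sorts both word lists and counts common distinct words with a two-pointer merge,
-- replacing A's quadratic membership scans; return values proved equal.

-- ===== PORT A =====
def get_num_common_words (doc1 : String × List String) (doc2 : String × List String) : Int :=
  let word_list1 := doc1.2
  let word_list2 := doc2.2
  let common_word_list :=
    word_list1.foldl
      (fun acc word => if word ∉ acc ∧ word ∈ word_list2 then acc ++ [word] else acc)
      ([] : List String)
  (common_word_list.length : Int)

-- ===== PORT B =====
-- the while loop over indices i, j of Source B, as structural recursion on the list suffixes;
-- the two inner duplicate-skipping whiles are the dropWhile calls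
def mergeCommon : List String → List String → Int
  | [], _ => 0
  | _ :: _, [] => 0
  | a :: as, b :: bs =>
    if a < b then mergeCommon as (b :: bs)
    else if b < a then mergeCommon (a :: as) bs
    else 1 + mergeCommon (as.dropWhile (· == a)) (bs.dropWhile (· == a))
termination_by l1 l2 => l1.length + l2.length
decreasing_by
  · simp
  · simp
  · have h1 := List.length_dropWhile_le (fun x => x == a) as
    have h2 := List.length_dropWhile_le (fun x => x == a) bs
    simp at *; omega

def get_num_common_words_alt (doc1 : String × List String) (doc2 : String × List String) : Int :=
  mergeCommon (PySem.List.sorted doc1.2 (fun x => x) false) (PySem.List.sorted doc2.2 (fun x => x) false)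

-- ===== PRECONDITION & SPEC =====
def Spec_get_num_common_words (doc1 : String × List String) (doc2 : String × List String) (out : Int) : Prop := out = get_num_common_words_alt doc1 doc2
instance (doc1 : String × List String) (doc2 : String × List String) (out : Int) : Decidable (Spec_get_num_common_words doc1 doc2 out) := by unfold Spec_get_num_common_words; infer_instance

-- ===== CLAIM (what is proved, stated in full; the proofs are below) =====
def Claim_equal_get_num_common_words : Prop := ∀ (doc1 : String × List String) (doc2 : String × List String), Dom_get_num_common_words doc1 doc2 → Spec_get_num_common_words doc1 doc2 (get_num_common_words doc1 doc2)

-- ===== LEMMAS AND PROOFS =====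

-- A's accumulation loop builds exactly the first occurrences of l1 (set(l1)'s order)
-- filtered by membership in l2.
lemma loopA_eq_filter_ofList (l2 : List String) (l1 : List String) :
    l1.foldl
      (fun acc word => if word ∉ acc ∧ word ∈ l2 then acc ++ [word] else acc)
      ([] : List String)
    = (PySem.Set.ofList l1).filter (fun w => decide (w ∈ l2)) := by
  induction l1 using List.reverseRecOn with
  | nil => simp [PySem.Set.ofList_nil]
  | append_singleton xs x ih =>
    rw [List.foldl_append, ih, PySem.Set.ofList_append_singleton]
    by_cases hx : x ∈ PySem.Set.ofList xs
    · rw [PySem.Set.add_of_mem hx]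
      by_cases hl : x ∈ l2
      · have hxf : x ∈ (PySem.Set.ofList xs).filter (fun w => decide (w ∈ l2)) := by
          simp [List.mem_filter, hx, hl]
        simp [List.foldl, hxf]
      · simp [List.foldl, hl]
    · rw [PySem.Set.add_of_not_mem hx]
      have hx' : x ∉ xs := by simpa [PySem.Set.mem_ofList] using hx
      have hxf : x ∉ (PySem.Set.ofList xs).filter (fun w => decide (w ∈ l2)) := by
        simp [List.mem_filter, PySem.Set.mem_ofList, hx']
      by_cases hl : x ∈ l2
      · simp [List.foldl, hxf, hl, List.filter_append]
      · simp [List.foldl, hl, List.filter_append]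

-- A's result counts the distinct common words of l1 and l2.
lemma resultA_eq_card (l1 l2 : List String) :
    ((((PySem.Set.ofList l1).filter (fun w => decide (w ∈ l2))).length : Int))
      = ((l1.toFinset ∩ l2.toFinset).card : Int) := by
  have hnd : ((PySem.Set.ofList l1).filter (fun w => decide (w ∈ l2))).Nodup :=
    (PySem.Set.nodup_ofList l1).filter _
  have hset : ((PySem.Set.ofList l1).filter (fun w => decide (w ∈ l2))).toFinset
      = l1.toFinset ∩ l2.toFinset := by
    apply Finset.ext
    intro w
    simp [PySem.Set.mem_ofList]
  rw [← List.toFinset_card_of_nodup hnd, hset]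

-- a sorted list whose elements are all ≥ a has no a left after dropping the leading a's
lemma not_mem_dropWhile_sorted (a : String) (l : List String)
    (hs : l.Pairwise (· ≤ ·)) (hge : ∀ x ∈ l, a ≤ x) :
    a ∉ l.dropWhile (· == a) := by
  induction l with
  | nil => simp
  | cons x t ih =>
    by_cases hx : x = a
    · subst hx
      rw [List.dropWhile_cons_of_pos (by simp)]
      exact ih hs.tail (fun y hy => hge y (List.mem_cons_of_mem _ hy))
    · rw [List.dropWhile_cons_of_neg (by simp [hx])]
      intro hmem
      rcases List.mem_cons.mp hmem with h | h
      · exact hx h.symm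
      · have h1 : x ≤ a := (List.pairwise_cons.mp hs).1 a h
        have h2 : a ≤ x := hge x (List.mem_cons_self)
        exact hx (le_antisymm h1 h2)

-- dropping the leading copies of a does not change the word set beyond a itself
lemma insert_toFinset_dropWhile (a : String) (l : List String) :
    insert a (l.dropWhile (· == a)).toFinset = insert a l.toFinset := by
  apply Finset.ext
  intro w
  simp only [Finset.mem_insert, List.mem_toFinset]
  constructor
  · rintro (h | h)
    · exact Or.inl h
    · exact Or.inr ((List.dropWhile_sublist _).mem h)
  · rintro (h | h)
    · exact Or.inl h
    · conv at h => rw [← List.takeWhile_append_dropWhile (p := (· == a)) (l := l)]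
      rcases List.mem_append.mp h with h | h
      · exact Or.inl (by simpa using List.mem_takeWhile_imp h)
      · exact Or.inr h

-- the two-pointer merge over sorted lists counts the distinct common words
lemma mergeCommon_eq_card (s1 s2 : List String)
    (h1 : s1.Pairwise (· ≤ ·)) (h2 : s2.Pairwise (· ≤ ·)) :
    mergeCommon s1 s2 = ((s1.toFinset ∩ s2.toFinset).card : Int) := by
  induction s1, s2 using mergeCommon.induct with
  | case1 s2 => simp [mergeCommon]
  | case2 a as => simp [mergeCommon]
  | case3 a as b bs hab ih =>
    have hnb : a ∉ (b :: bs).toFinset := by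
      simp only [List.mem_toFinset]
      intro hmem
      rcases List.mem_cons.mp hmem with h | h
      · exact absurd (h ▸ hab) (lt_irrefl _)
      · exact absurd (lt_of_lt_of_le hab ((List.pairwise_cons.mp h2).1 a h)) (lt_irrefl _)
    rw [mergeCommon, if_pos hab, ih h1.tail h2]
    simp only [List.toFinset_cons] at hnb ⊢
    rw [Finset.insert_inter_of_notMem hnb]
  | case4 a as b bs hab hba ih =>
    have hna : b ∉ (a :: as).toFinset := by
      simp only [List.mem_toFinset]
      intro hmem
      rcases List.mem_cons.mp hmem with h | h
      · exact absurd (h ▸ hba) (lt_irrefl _)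
      · exact absurd (lt_of_lt_of_le hba ((List.pairwise_cons.mp h1).1 b h)) (lt_irrefl _)
    rw [mergeCommon, if_neg hab, if_pos hba, ih h1 h2.tail]
    simp only [List.toFinset_cons] at hna ⊢
    rw [Finset.inter_insert_of_notMem hna]
  | case5 a as b bs hab hba ih =>
    have heq : a = b := le_antisymm (not_lt.mp hba) (not_lt.mp hab)
    subst heq
    have hge1 : ∀ x ∈ as, a ≤ x := (List.pairwise_cons.mp h1).1
    have hge2 : ∀ x ∈ bs, a ≤ x := (List.pairwise_cons.mp h2).1
    have hs1 : (as.dropWhile (· == a)).Pairwise (· ≤ ·) :=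
      h1.tail.sublist (List.dropWhile_sublist _)
    have hs2 : (bs.dropWhile (· == a)).Pairwise (· ≤ ·) :=
      h2.tail.sublist (List.dropWhile_sublist _)
    have hna : a ∉ (as.dropWhile (· == a)).toFinset ∩ (bs.dropWhile (· == a)).toFinset := by
      simp only [Finset.mem_inter, List.mem_toFinset]
      intro h
      exact not_mem_dropWhile_sorted a as h1.tail hge1 h.1
    have hfin : (a :: as).toFinset ∩ (a :: bs).toFinset
        = insert a ((as.dropWhile (· == a)).toFinset ∩ (bs.dropWhile (· == a)).toFinset) := by
      rw [List.toFinset_cons, List.toFinset_cons,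
        ← insert_toFinset_dropWhile a as, ← insert_toFinset_dropWhile a bs]
      apply Finset.ext
      intro w
      simp only [Finset.mem_inter, Finset.mem_insert]
      tauto
    rw [mergeCommon, if_neg hab, if_neg hba, ih hs1 hs2, hfin,
      Finset.card_insert_of_notMem hna]
    push_cast
    ring

-- ===== VERDICT (by name: the statement is the Claim_ definition above) =====
theorem get_num_common_words_spec : Claim_equal_get_num_common_words := by
  intro doc1 doc2 _
  show get_num_common_words doc1 doc2 = get_num_common_words_alt doc1 doc2
  dsimp only [get_num_common_words, get_num_common_words_alt]
  rw [loopA_eq_filter_ofList, resultA_eq_card,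
    mergeCommon_eq_card _ _
      (by simpa using PySem.List.sorted_pairwise doc1.2 (fun x => x))
      (by simpa using PySem.List.sorted_pairwise doc2.2 (fun x => x)),
    List.toFinset_eq_of_perm _ _ (PySem.List.sorted_perm doc1.2 (fun x => x) false),
    List.toFinset_eq_of_perm _ _ (PySem.List.sorted_perm doc2.2 (fun x => x) false)]
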